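-- pv_equiv track=rewrite | github.com/Fernandosoriano/python | diccionarios/1diccionariosExcersises.py | urls_counter
-- ===== SOURCE A (Python) =====
-- def urls_counter(emails:list, urls:list) -> dict:
--     """Function that receives a list of emails and
--     a list of urls, and returns a dict, in which the
--     keys are the urls, and their values  have the number
--     of emails that have the domain of the corresponing
--     email.
--
--     Args:
--         emails (list): list of emails to analize
--         url (list): list of urls to count
--
--     Returns:
--         dict: a dictionary whose keys are the URLs and its values ​​are
--         the number of emails that have the corresponding URL as a domain
--     """
--     count:int = 0
--     counter_ls:list = []
--     for url in urls:
--         for email in emails: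
--             if url[4::] in email:
--                 count += 1
--         counter_ls.append(count)
--         count:int = 0
--     complete_dic:dict = dict(zip(urls,counter_ls))
--     res_dict:dict = {key:complete_dic[key] for key in complete_dic if complete_dic[key] !=0}
--     return res_dict
-- ===== SOURCE B (Python) =====
-- def urls_counter(emails: list, urls: list) -> dict:
--     # Substring-index counting: instead of testing every (url, email) pair with
--     # 'in', enumerate each email's substrings of the relevant pattern lengths,
--     # look them up in a hash set of patterns, and tally one count per
--     # (email, pattern) pair in a dict; finally map urls to their pattern's count,
--     # keeping only nonzero counts (first-occurrence key order).
--     pats = set(u[4:] for u in urls)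
--     lens = set(len(p) for p in pats)
--     cnt = {}
--     for e in emails:
--         seen = set()
--         for L in lens:
--             for i in range(len(e) - L + 1):
--                 s = e[i:i + L]
--                 if s in pats:
--                     seen.add(s)
--         for s in seen:
--             cnt[s] = cnt.get(s, 0) + 1
--     res = {}
--     for u in urls:
--         c = cnt.get(u[4:], 0)
--         if c != 0:
--             res[u] = c
--     return res
-- ===== Notes on version B (the rewrite author's own statement) =====
-- stated objective: faster
-- what changed: B replaces A's per-(url, email) 'in' substring tests by a substring index: it enumerates each email's substrings of the relevant pattern lengths, looks them up in a hash set of the patterns url[4:], tallies one count per (email, pattern) pair in a dict, and finally maps each url to its pattern's count, keeping nonzero counts.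
import Mathlib
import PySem

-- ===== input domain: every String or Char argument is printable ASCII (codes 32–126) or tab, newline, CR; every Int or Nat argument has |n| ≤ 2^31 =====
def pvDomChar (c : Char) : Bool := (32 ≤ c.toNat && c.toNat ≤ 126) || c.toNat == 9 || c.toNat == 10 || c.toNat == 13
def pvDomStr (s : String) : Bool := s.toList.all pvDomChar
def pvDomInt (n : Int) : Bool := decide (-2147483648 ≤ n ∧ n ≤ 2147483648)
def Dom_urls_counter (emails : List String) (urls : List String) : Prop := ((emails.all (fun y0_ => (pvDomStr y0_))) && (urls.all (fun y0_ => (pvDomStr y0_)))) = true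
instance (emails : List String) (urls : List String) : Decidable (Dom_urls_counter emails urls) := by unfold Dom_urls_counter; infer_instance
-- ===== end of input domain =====

-- B replaces A's per-(url, email) substring tests by a substring index: it enumerates each
-- email's substrings of the relevant pattern lengths, looks them up in a hash set of the
-- patterns url[4:], tallies one count per (email, pattern) pair in a dict, and maps each url
-- to its pattern's count, keeping nonzero counts (faster, measured).

-- ===== PORT A =====
-- Literal port of A: count list built url by url, dict(zip(urls, counter_ls)), then the
-- filtering dict comprehension.  complete_dic[key] is ported as getD (exact: key ∈ keys).
def urls_counter (emails : List String) (urls : List String) : List (String × Int) :=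
  let st := urls.foldl (fun (st : Int × List Int) url =>
      let count := emails.foldl (fun count email =>
          if PySem.Str.isIn (PySem.Str.slice url (some 4) none) email then count + 1 else count) st.1
      (0, st.2 ++ [count])) ((0 : Int), ([] : List Int))
  let counter_ls : List Int := st.2
  let complete_dic : PySem.Dict String Int := PySem.Dict.ofList (urls.zip counter_ls)
  let res_dict : PySem.Dict String Int := complete_dic.keys.foldl (fun r key =>
      if complete_dic.getD key 0 ≠ 0 then r.insert key (complete_dic.getD key 0) else r) PySem.Dict.empty
  res_dict.items

-- ===== PORT B =====
-- Literal port of Source B: pattern set, length set, then per email the set `seen` of patterns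
-- occurring as a slice e[i:i+L], tallied into the counter dict `cnt`; finally the result dict.
def urls_counter_alt (emails : List String) (urls : List String) : List (String × Int) :=
  let pats : PySem.Set String := PySem.Set.ofList (urls.map (fun u => PySem.Str.slice u (some 4) none))
  let lens : PySem.Set Int := PySem.Set.ofList (pats.map (fun p => PySem.Str.len p))
  let cnt : PySem.Dict String Int := emails.foldl (fun cnt e =>
      let seen : PySem.Set String := lens.foldl (fun seen L =>
          (PySem.List.pyRange 0 (PySem.Str.len e - L + 1) 1).foldl (fun seen i =>
              let s := PySem.Str.slice e (some i) (some (i + L))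
              if pats.contains s then seen.add s else seen) seen) PySem.Set.empty
      seen.foldl (fun cnt s => cnt.insert s (cnt.getD s 0 + 1)) cnt) PySem.Dict.empty
  let res : PySem.Dict String Int := urls.foldl (fun res u =>
      let c := cnt.getD (PySem.Str.slice u (some 4) none) 0
      if c ≠ 0 then res.insert u c else res) PySem.Dict.empty
  res.items

-- ===== PRECONDITION & SPEC =====
def Spec_urls_counter (emails : List String) (urls : List String) (out : List (String × Int)) : Prop := out = urls_counter_alt emails urls
instance (emails : List String) (urls : List String) (out : List (String × Int)) : Decidable (Spec_urls_counter emails urls out) := by unfold Spec_urls_counter; infer_instance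

-- ===== CLAIM (what is proved, stated in full; the proofs are below) =====
def Claim_equal_urls_counter : Prop := ∀ (emails : List String) (urls : List String), Dom_urls_counter emails urls → Spec_urls_counter emails urls (urls_counter emails urls)

-- ===== LEMMAS AND PROOFS =====

/-- Number of emails containing `p` (the count both programs attach to a pattern). -/
def pvCnt (emails : List String) (p : String) : Int :=
  (emails.map (fun e => if PySem.Str.isIn p e then (1 : Int) else 0)).sum

/-- The count attached to a url: `pvCnt` of its pattern `url[4:]`. -/
def pvF (emails : List String) (u : String) : Int :=
  pvCnt emails (PySem.Str.slice u (some 4) none)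

/-- Common result-building loop body both ports reduce to. -/
def pvStep (emails : List String) (r : PySem.Dict String Int) (u : String) : PySem.Dict String Int :=
  if pvF emails u ≠ 0 then r.insert u (pvF emails u) else r

/-- B's `seen` set for one email: patterns of `pats` found as a slice of `e` (let-free form). -/
def pvSeen (pats : PySem.Set String) (lens : List Int) (e : String) : PySem.Set String :=
  lens.foldl (fun seen L =>
      (PySem.List.pyRange 0 (PySem.Str.len e - L + 1) 1).foldl (fun seen i =>
          if pats.contains (PySem.Str.slice e (some i) (some (i + L))) then
            seen.add (PySem.Str.slice e (some i) (some (i + L))) else seen) seen) PySem.Set.empty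

lemma pvCount_eq (emails : List String) (p : String) (c : Int) :
    List.foldl (fun count email => if PySem.Str.isIn p email then count + 1 else count) c emails
      = c + pvCnt emails p := by
  rw [PySem.List.foldl_count_if (fun email => PySem.Str.isIn p email)]
  rw [pvCnt, PySem.List.sum_map_ite_one_zero (fun e => PySem.Str.isIn p e)]

lemma pvCounterList (emails : List String) (l : List String) (acc : List Int) :
    (List.foldl (fun (st : Int × List Int) url =>
        (0, st.2 ++ [List.foldl (fun count email =>
            if PySem.Str.isIn (PySem.Str.slice url (some 4) none) email then count + 1 else count) st.1 emails]))
      ((0 : Int), acc) l).2 = acc ++ l.map (pvF emails) := by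
  induction l generalizing acc with
  | nil => simp
  | cons u l ih =>
    simp only [List.foldl_cons, List.map_cons]
    rw [ih, pvCount_eq]
    simp [pvF]

lemma pvZipMap (f : String → Int) (l : List String) :
    l.zip (l.map f) = l.map (fun u => (u, f u)) := by
  induction l with
  | nil => simp
  | cons x xs ih => simp [ih]

lemma pvGetFoldIns (emails : List String) (l : List String) (d : PySem.Dict String Int) (k : String) :
    (List.foldl (fun d u => d.insert u (pvF emails u)) d l).get? k
      = if k ∈ l then some (pvF emails k) else d.get? k := by
  induction l generalizing d with
  | nil => simp
  | cons u l ih =>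
    simp only [List.foldl_cons]
    rw [ih]
    by_cases hl : k ∈ l
    · simp [hl]
    · by_cases hk : k = u
      · subst hk; simp [hl]
      · simp [hl, hk, PySem.Dict.get?_insert]

lemma pvKeysD (emails : List String) (urls : List String) :
    (List.foldl (fun d u => d.insert u (pvF emails u)) PySem.Dict.empty urls).keys
      = PySem.Set.ofList urls := by
  have h := PySem.Dict.keys_foldl_insert urls (fun _ u => pvF emails u)
      (PySem.Dict.empty (κ := String) (ν := Int))
  simpa [PySem.Dict.keys_empty, PySem.Set.update_nil_left] using h

lemma pvGetStep (emails : List String) (l : List String) (d : PySem.Dict String Int) (k : String) :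
    (List.foldl (pvStep emails) d l).get? k
      = if k ∈ l ∧ pvF emails k ≠ 0 then some (pvF emails k) else d.get? k := by
  induction l generalizing d with
  | nil => simp
  | cons u l ih =>
    simp only [List.foldl_cons]
    rw [ih]
    by_cases hl : k ∈ l ∧ pvF emails k ≠ 0
    · simp [hl.1, hl.2]
    · by_cases hk : k = u
      · subst hk
        by_cases hf : pvF emails k = 0
        · simp [pvStep, hf]
        · simp [pvStep, hf]
      · have hp : (pvStep emails d u).get? k = d.get? k := by
          unfold pvStep
          split
          · rw [PySem.Dict.get?_insert]; simp [hk]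
          · rfl
        simp [hp, List.mem_cons, hk, hl]

lemma pvNodupStep (emails : List String) (l : List String) (d : PySem.Dict String Int)
    (h : d.keys.Nodup) : (List.foldl (pvStep emails) d l).keys.Nodup := by
  induction l generalizing d with
  | nil => simpa
  | cons u l ih =>
    simp only [List.foldl_cons]
    apply ih
    unfold pvStep
    split
    · exact PySem.Dict.nodup_keys_insert _ _ _ h
    · exact h

lemma pvInsertSelf (d : PySem.Dict String Int) (k : String) (v : Int)
    (hn : d.keys.Nodup) (hg : d.get? k = some v) : d.insert k v = d := by
  apply PySem.Dict.ext
  have hc : d.contains k = true := by rw [PySem.Dict.contains_eq_isSome_get?, hg]; rfl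
  rw [PySem.Dict.items_insert_of_contains _ _ hc]
  have hall : ∀ p ∈ d.items, (if (p.1 == k) = true then (k, v) else p) = p := by
    intro p hp
    obtain ⟨p1, p2⟩ := p
    by_cases hpk : p1 = k
    · subst hpk
      have hmem : (p1, p2) ∈ d.items := hp
      have hv := PySem.Dict.get?_of_mem_items d hmem hn
      rw [hg] at hv
      simp only [Option.some.injEq] at hv
      simp [hv]
    · simp [hpk]
  rw [List.map_congr_left hall]
  simp

lemma pvDedupFold (emails : List String) (l : List String) :
    List.foldl (pvStep emails) PySem.Dict.empty l
      = List.foldl (pvStep emails) PySem.Dict.empty (PySem.Set.ofList l) := by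
  induction l using List.reverseRecOn with
  | nil => rfl
  | append_singleton l u ih =>
    rw [List.foldl_append, PySem.Set.ofList_append_singleton]
    by_cases hu : u ∈ l
    · have hc : (PySem.Set.ofList l).contains u = true :=
        (PySem.Set.contains_iff _ _).mpr ((PySem.Set.mem_ofList l u).mpr hu)
      rw [show (PySem.Set.ofList l).add u = PySem.Set.ofList l by
        simp [PySem.Set.add, hu]]
      rw [← ih]
      simp only [List.foldl_cons, List.foldl_nil]
      by_cases hf : pvF emails u = 0
      · simp [pvStep, hf]
      · have hg : (List.foldl (pvStep emails) PySem.Dict.empty l).get? u = some (pvF emails u) := by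
          rw [pvGetStep]; simp [hu, hf]
        have hn : (List.foldl (pvStep emails) PySem.Dict.empty l).keys.Nodup :=
          pvNodupStep emails l _ (by simp [PySem.Dict.keys_empty])
        simp only [pvStep, hf, ne_eq, not_false_iff, if_pos]
        simp [pvInsertSelf _ _ _ hn hg]
    · have hc : (PySem.Set.ofList l).contains u = false := by
        rw [Bool.eq_false_iff]
        intro h
        exact hu ((PySem.Set.mem_ofList l u).mp ((PySem.Set.contains_iff _ _).mp h))
      rw [show (PySem.Set.ofList l).add u = PySem.Set.ofList l ++ [u] by
        simp [PySem.Set.add, hu]]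
      rw [List.foldl_append, ih]

/-- Membership in an "add if condition" fold over any index list. -/
lemma pvMemAddIf {β : Type} (l : List β) (c : β → Bool) (g : β → String)
    (acc : PySem.Set String) (x : String) :
    x ∈ l.foldl (fun s i => if c i then PySem.Set.add s (g i) else s) acc
      ↔ x ∈ acc ∨ ∃ i ∈ l, c i = true ∧ g i = x := by
  induction l generalizing acc with
  | nil => simp
  | cons b l ih =>
    simp only [List.foldl_cons]
    rw [ih]
    by_cases hc : c b
    · simp only [hc, if_pos, PySem.Set.mem_add, List.mem_cons]
      constructor
      · rintro (⟨h | h⟩ | ⟨i, hi, hci, hgi⟩)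
        · exact Or.inl h
        · exact Or.inr ⟨b, Or.inl rfl, hc, h.symm⟩
        · exact Or.inr ⟨i, Or.inr hi, hci, hgi⟩
      · rintro (h | ⟨i, hi | hi, hci, hgi⟩)
        · exact Or.inl (Or.inl h)
        · subst hi; exact Or.inl (Or.inr hgi.symm)
        · exact Or.inr ⟨i, hi, hci, hgi⟩
    · simp only [hc, Bool.false_eq_true, List.mem_cons]
      constructor
      · rintro (h | ⟨i, hi, hci, hgi⟩)
        · exact Or.inl h
        · exact Or.inr ⟨i, Or.inr hi, hci, hgi⟩
      · rintro (h | ⟨i, hi | hi, hci, hgi⟩)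
        · exact Or.inl h
        · subst hi; exact absurd hci (by simp [hc])
        · exact Or.inr ⟨i, hi, hci, hgi⟩

lemma pvNodupAddIf {β : Type} (l : List β) (c : β → Bool) (g : β → String)
    (acc : PySem.Set String) (h : acc.Nodup) :
    (l.foldl (fun s i => if c i then PySem.Set.add s (g i) else s) acc).Nodup := by
  induction l generalizing acc with
  | nil => simpa
  | cons b l ih =>
    simp only [List.foldl_cons]
    apply ih
    split
    · exact PySem.Set.nodup_add acc (g b) h
    · exact h

lemma pvMemSeenFold (pats : PySem.Set String) (lens : List Int) (e : String)
    (acc : PySem.Set String) (x : String) :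
    x ∈ lens.foldl (fun seen L =>
        (PySem.List.pyRange 0 (PySem.Str.len e - L + 1) 1).foldl (fun seen i =>
            if pats.contains (PySem.Str.slice e (some i) (some (i + L))) then
              seen.add (PySem.Str.slice e (some i) (some (i + L))) else seen) seen) acc
      ↔ x ∈ acc ∨ ∃ L ∈ lens, ∃ i : Int, 0 ≤ i ∧ i < PySem.Str.len e - L + 1 ∧
          pats.contains (PySem.Str.slice e (some i) (some (i + L))) = true ∧
          PySem.Str.slice e (some i) (some (i + L)) = x := by
  induction lens generalizing acc with
  | nil => simp
  | cons L lens ih =>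
    simp only [List.foldl_cons]
    rw [ih, pvMemAddIf]
    constructor
    · rintro (⟨h | ⟨i, hi, hci, hgi⟩⟩ | ⟨L', hL', i, hi0, hi1, hci, hgi⟩)
      · exact Or.inl h
      · obtain ⟨h0, h1⟩ := PySem.List.mem_pyRange_one.mp hi
        exact Or.inr ⟨L, List.mem_cons_self, i, h0, h1, hci, hgi⟩
      · exact Or.inr ⟨L', List.mem_cons_of_mem _ hL', i, hi0, hi1, hci, hgi⟩
    · rintro (h | ⟨L', hmem, i, hi0, hi1, hci, hgi⟩)
      · exact Or.inl (Or.inl h)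
      · rcases List.mem_cons.mp hmem with hL' | hL'
        · subst hL'
          exact Or.inl (Or.inr ⟨i, PySem.List.mem_pyRange_one.mpr ⟨hi0, hi1⟩, hci, hgi⟩)
        · exact Or.inr ⟨L', hL', i, hi0, hi1, hci, hgi⟩

lemma pvNodupSeenFold (pats : PySem.Set String) (lens : List Int) (e : String)
    (acc : PySem.Set String) (h : acc.Nodup) :
    (lens.foldl (fun seen L =>
        (PySem.List.pyRange 0 (PySem.Str.len e - L + 1) 1).foldl (fun seen i =>
            if pats.contains (PySem.Str.slice e (some i) (some (i + L))) then
              seen.add (PySem.Str.slice e (some i) (some (i + L))) else seen) seen) acc).Nodup := by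
  induction lens generalizing acc with
  | nil => simpa
  | cons L lens ih =>
    simp only [List.foldl_cons]
    exact ih _ (pvNodupAddIf _ _ _ _ h)

lemma pvNodupSeen (pats : PySem.Set String) (lens : List Int) (e : String) :
    (pvSeen pats lens e).Nodup :=
  pvNodupSeenFold pats lens e PySem.Set.empty (by simp [PySem.Set.empty])

/-- The crux: a pattern is in `seen(e)` iff it is a pattern and a substring of `e`. -/
lemma pvMemSeen (pats : PySem.Set String) (e x : String) :
    x ∈ pvSeen pats (PySem.Set.ofList (pats.map (fun p => PySem.Str.len p))) e
      ↔ pats.contains x = true ∧ PySem.Str.isIn x e = true := by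
  unfold pvSeen
  rw [pvMemSeenFold]
  constructor
  · rintro (h | ⟨L, hL, i, hi0, hi1, hci, hgi⟩)
    · simp [PySem.Set.empty] at h
    · have hL0 : 0 ≤ L := by
        obtain ⟨q, _, rfl⟩ := List.mem_map.mp ((PySem.Set.mem_ofList _ _).mp hL)
        rw [PySem.Str.len_eq]; positivity
      refine ⟨by rw [← hgi]; exact hci, ?_⟩
      have hpre : x.toList <+: e.toList.drop i.toNat := by
        rw [← hgi, PySem.Str.toList_slice, PySem.Chars.slice_eq_listSlice,
          PySem.List.slice_toNat _ hi0 (by omega)]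
        exact List.take_prefix _ _
      rw [PySem.Str.isIn_eq]
      exact (PySem.Chars.exists_prefix_drop_iff_isIn _ _).mp ⟨i.toNat, hpre⟩
  · rintro ⟨hcx, hin⟩
    have hx : x ∈ pats := (PySem.Set.contains_iff _ _).mp hcx
    have hLmem : PySem.Str.len x ∈ PySem.Set.ofList (pats.map (fun p => PySem.Str.len p)) :=
      (PySem.Set.mem_ofList _ _).mpr (List.mem_map_of_mem hx)
    rw [PySem.Str.isIn_eq] at hin
    obtain ⟨j0, hj0⟩ := (PySem.Chars.exists_prefix_drop_iff_isIn _ _).mpr hin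
    have hexists : ∃ j, j ≤ e.toList.length ∧ x.toList <+: e.toList.drop j := by
      by_cases h : j0 ≤ e.toList.length
      · exact ⟨j0, h, hj0⟩
      · have hd : e.toList.drop j0 = [] := List.drop_eq_nil_of_le (by omega)
        rw [hd] at hj0
        have hxnil : x.toList = [] := List.prefix_nil.mp hj0
        exact ⟨0, Nat.zero_le _, by rw [List.drop_zero, hxnil]; exact List.nil_prefix⟩
    obtain ⟨j, hjn, hpre⟩ := hexists
    have hlen : x.toList.length ≤ e.toList.length - j := by
      simpa using hpre.length_le
    have hsl : PySem.Str.slice e (some (j : Int)) (some ((j : Int) + PySem.Str.len x)) = x := by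
      apply String.toList_inj.mp
      rw [PySem.Str.toList_slice, PySem.Chars.slice_eq_listSlice, PySem.Str.len_eq,
        PySem.List.slice_natCast_add]
      exact (List.prefix_iff_eq_take.mp hpre).symm
    refine Or.inr ⟨PySem.Str.len x, hLmem, (j : Int), by positivity, ?_, ?_, ?_⟩
    · rw [PySem.Str.len_eq, PySem.Str.len_eq]; omega
    · rw [hsl]; exact hcx
    · exact hsl

/-- The counter fold over the emails counts, per pattern, the emails whose `seen` contains it. -/
lemma pvCntFold (pats : PySem.Set String) (lens : List Int) (emails : List String)
    (d : PySem.Dict String Int) (p : String) :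
    (emails.foldl (fun cnt e =>
        (pvSeen pats lens e).foldl (fun cnt s => cnt.insert s (cnt.getD s 0 + 1)) cnt) d).getD p 0
      = d.getD p 0 + (emails.map (fun e => if p ∈ pvSeen pats lens e then (1 : Int) else 0)).sum := by
  induction emails generalizing d with
  | nil => simp
  | cons e emails ih =>
    simp only [List.foldl_cons, List.map_cons, List.sum_cons]
    rw [ih, PySem.Dict.getD_foldl_insert_add_one]
    by_cases hm : p ∈ pvSeen pats lens e
    · rw [List.count_eq_one_of_mem (pvNodupSeen pats lens e) hm]
      simp [hm]; ring
    · rw [List.count_eq_zero.mpr hm]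
      simp [hm]

lemma pvB_eq (emails : List String) (urls : List String) :
    urls_counter_alt emails urls
      = (List.foldl (pvStep emails) PySem.Dict.empty urls).items := by
  simp only [urls_counter_alt]
  rw [show (fun (cnt : PySem.Dict String Int) e =>
      (PySem.Set.ofList ((PySem.Set.ofList (urls.map (fun u => PySem.Str.slice u (some 4) none))).map
          (fun p => PySem.Str.len p))).foldl (fun seen L =>
        (PySem.List.pyRange 0 (PySem.Str.len e - L + 1) 1).foldl (fun seen i =>
            if (PySem.Set.ofList (urls.map (fun u => PySem.Str.slice u (some 4) none))).contains
                (PySem.Str.slice e (some i) (some (i + L))) then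
              seen.add (PySem.Str.slice e (some i) (some (i + L))) else seen) seen)
        (PySem.Set.empty)
      |>.foldl (fun cnt s => cnt.insert s (cnt.getD s 0 + 1)) cnt)
    = (fun (cnt : PySem.Dict String Int) e =>
      (pvSeen (PySem.Set.ofList (urls.map (fun u => PySem.Str.slice u (some 4) none)))
          (PySem.Set.ofList ((PySem.Set.ofList (urls.map (fun u => PySem.Str.slice u (some 4) none))).map
            (fun p => PySem.Str.len p))) e).foldl
        (fun cnt s => cnt.insert s (cnt.getD s 0 + 1)) cnt) from by
    funext cnt e; rfl]
  refine congrArg PySem.Dict.items ?_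
  refine PySem.List.foldl_congr_mem' urls _ _ _ ?_
  intro u hu r
  have hcu : (PySem.Set.ofList (urls.map (fun u => PySem.Str.slice u (some 4) none))).contains
      (PySem.Str.slice u (some 4) none) = true :=
    (PySem.Set.contains_iff _ _).mpr ((PySem.Set.mem_ofList _ _).mpr (List.mem_map_of_mem hu))
  have hg : (List.foldl (fun (cnt : PySem.Dict String Int) e =>
      (pvSeen (PySem.Set.ofList (urls.map (fun u => PySem.Str.slice u (some 4) none)))
          (PySem.Set.ofList ((PySem.Set.ofList (urls.map (fun u => PySem.Str.slice u (some 4) none))).map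
            (fun p => PySem.Str.len p))) e).foldl
        (fun cnt s => cnt.insert s (cnt.getD s 0 + 1)) cnt) PySem.Dict.empty emails).getD
      (PySem.Str.slice u (some 4) none) 0 = pvF emails u := by
    rw [pvCntFold]
    have hmap : ∀ e : String,
        (if PySem.Str.slice u (some 4) none ∈
            pvSeen (PySem.Set.ofList (urls.map (fun u => PySem.Str.slice u (some 4) none)))
              (PySem.Set.ofList ((PySem.Set.ofList (urls.map (fun u => PySem.Str.slice u (some 4) none))).map
                (fun p => PySem.Str.len p))) e then (1 : Int) else 0)
          = (if PySem.Str.isIn (PySem.Str.slice u (some 4) none) e then (1 : Int) else 0) := by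
      intro e
      by_cases hm : PySem.Str.isIn (PySem.Str.slice u (some 4) none) e = true
      · have hmem := (pvMemSeen (PySem.Set.ofList (urls.map (fun u => PySem.Str.slice u (some 4) none)))
          e (PySem.Str.slice u (some 4) none)).mpr ⟨hcu, hm⟩
        rw [if_pos hmem, if_pos hm]
      · have hnmem : ¬ PySem.Str.slice u (some 4) none ∈
            pvSeen (PySem.Set.ofList (urls.map (fun u => PySem.Str.slice u (some 4) none)))
              (PySem.Set.ofList ((PySem.Set.ofList (urls.map (fun u => PySem.Str.slice u (some 4) none))).map
                (fun p => PySem.Str.len p))) e :=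
          fun h => hm ((pvMemSeen _ _ _).mp h).2
        rw [if_neg hnmem, if_neg hm]
    rw [List.map_congr_left (fun e _ => hmap e)]
    simp [pvF, pvCnt, PySem.Dict.getD]
  simp only [hg, pvStep]

lemma pvA_eq (emails : List String) (urls : List String) :
    urls_counter emails urls
      = (List.foldl (pvStep emails) PySem.Dict.empty (PySem.Set.ofList urls)).items := by
  simp only [urls_counter]
  rw [pvCounterList emails urls ([] : List Int), List.nil_append]
  rw [pvZipMap (pvF emails) urls]
  rw [show PySem.Dict.ofList (urls.map fun u => (u, pvF emails u))
      = List.foldl (fun (d : PySem.Dict String Int) u => d.insert u (pvF emails u)) PySem.Dict.empty urls from by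
    simp [PySem.Dict.ofList, PySem.Dict.update, List.foldl_map]]
  rw [pvKeysD emails urls]
  refine congrArg PySem.Dict.items ?_
  refine PySem.List.foldl_congr_mem' _ _ _ _ ?_
  intro k hk r
  have hku : k ∈ urls := (PySem.Set.mem_ofList urls k).mp hk
  have hg : (List.foldl (fun (d : PySem.Dict String Int) u => d.insert u (pvF emails u)) PySem.Dict.empty urls).getD k 0 = pvF emails k := by
    rw [PySem.Dict.getD_eq_get?_getD, pvGetFoldIns]
    simp [hku]
  simp only [hg, pvStep]

-- ===== VERDICT (by name: the statement is the Claim_ definition above) =====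
theorem urls_counter_spec : Claim_equal_urls_counter := by
  intro emails urls _
  unfold Spec_urls_counter
  rw [pvA_eq, pvB_eq, ← pvDedupFold emails urls]
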